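-- pv_equiv track=rewrite | github.com/MrBrantCode/unitest_baseline | mut_generate/mist_train_taco/taco_10444/solution.py | find_word_occurrences
-- ===== SOURCE A (Python) =====
-- from collections import defaultdict
--
-- def find_word_occurrences(group_A, group_B):
--     word_indices = defaultdict(list)
--
--     # Populate the defaultdict with indices of words in group A
--     for index, word in enumerate(group_A):
--         word_indices[word].append(str(index + 1))
--
--     # Prepare the result list based on group B
--     result = []
--     for word in group_B:
--         if word in word_indices:
--             result.append(' '.join(word_indices[word]))
--         else:
--             result.append('-1')
--
--     return result
-- ===== SOURCE B (Python) =====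
-- def find_word_occurrences(group_A, group_B):
--     def fmt(word):
--         matches = [str(i + 1) for i, x in enumerate(group_A) if x == word]
--         return ' '.join(matches) if matches else '-1'
--     return [fmt(word) for word in group_B]
-- ===== Notes on version B (the rewrite author's own statement) =====
-- stated objective: simpler
-- what changed: Drops the defaultdict index entirely: for each query word a direct comprehension over enumerate(group_A) collects the 1-based indices, so no dictionary is built or looked up.
import Mathlib
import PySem

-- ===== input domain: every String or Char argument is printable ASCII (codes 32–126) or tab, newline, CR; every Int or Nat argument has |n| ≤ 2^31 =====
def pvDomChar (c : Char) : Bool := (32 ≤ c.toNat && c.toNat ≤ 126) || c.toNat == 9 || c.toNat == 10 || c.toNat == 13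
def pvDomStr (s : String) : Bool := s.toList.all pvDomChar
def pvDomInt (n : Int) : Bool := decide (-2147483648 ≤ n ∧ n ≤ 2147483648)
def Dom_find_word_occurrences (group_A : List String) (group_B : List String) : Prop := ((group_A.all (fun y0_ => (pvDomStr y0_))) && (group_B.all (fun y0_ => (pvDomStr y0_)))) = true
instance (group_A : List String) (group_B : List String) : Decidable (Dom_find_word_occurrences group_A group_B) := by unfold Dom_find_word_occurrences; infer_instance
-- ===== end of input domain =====

-- B drops A's defaultdict index and answers each query by a direct scan of group_A (simpler, no dict).

-- ===== PORT A =====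
-- word_indices[word].append(str(index + 1)) over enumerate(group_A)
def pvBuildA (group_A : List String) : PySem.Dict String (List String) :=
  (PySem.List.enumerate group_A).foldl
    (fun d p => d.modify p.2 [] (fun l => l ++ [PySem.Int.toStr (p.1 + 1)]))
    PySem.Dict.empty

def find_word_occurrences (group_A : List String) (group_B : List String) : List String :=
  let word_indices := pvBuildA group_A
  group_B.foldl
    (fun result word =>
      if word_indices.contains word then
        result ++ [PySem.Str.join " " (word_indices.getD word [])]
      else
        result ++ ["-1"])
    []

-- ===== PORT B =====
def pvFmt (group_A : List String) (word : String) : String :=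
  let ms := (PySem.List.enumerate group_A).filterMap
    (fun p => if p.2 = word then some (PySem.Int.toStr (p.1 + 1)) else none)
  if ms ≠ [] then PySem.Str.join " " ms else "-1"

def find_word_occurrences_alt (group_A : List String) (group_B : List String) : List String :=
  group_B.map (pvFmt group_A)

-- ===== PRECONDITION & SPEC =====
def Spec_find_word_occurrences (group_A : List String) (group_B : List String) (out : List String) : Prop := out = find_word_occurrences_alt group_A group_B
instance (group_A : List String) (group_B : List String) (out : List String) : Decidable (Spec_find_word_occurrences group_A group_B out) := by unfold Spec_find_word_occurrences; infer_instance

-- ===== CLAIM (what is proved, stated in full; the proofs are below) =====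
def Claim_equal_find_word_occurrences : Prop := ∀ (group_A : List String) (group_B : List String), Dom_find_word_occurrences group_A group_B → Spec_find_word_occurrences group_A group_B (find_word_occurrences group_A group_B)

-- ===== LEMMAS AND PROOFS =====

theorem pvBuild_getD (l : List (Int × String)) (d : PySem.Dict String (List String)) (w : String) :
    (l.foldl (fun d p => d.modify p.2 [] (fun l => l ++ [PySem.Int.toStr (p.1 + 1)])) d).getD w []
      = d.getD w [] ++ l.filterMap (fun p => if p.2 = w then some (PySem.Int.toStr (p.1 + 1)) else none) := by
  induction l generalizing d with
  | nil => simp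
  | cons p rest ih =>
    simp only [List.foldl_cons, List.filterMap_cons, ih]
    rw [PySem.Dict.getD_modify]
    by_cases h : p.2 = w
    · simp [h]
    · simp [h, Ne.symm h]

theorem pvBuild_contains (l : List (Int × String)) (d : PySem.Dict String (List String)) (w : String) :
    (l.foldl (fun d p => d.modify p.2 [] (fun l => l ++ [PySem.Int.toStr (p.1 + 1)])) d).contains w
      = (d.contains w || l.any (fun p => p.2 == w)) := by
  induction l generalizing d with
  | nil => simp
  | cons p rest ih =>
    rw [List.foldl_cons, ih, List.any_cons, PySem.Dict.contains_modify]
    by_cases h : p.2 = w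
    · simp [h]
    · have h2 : (w == p.2) = false := by simp [Ne.symm h]
      have h3 : (p.2 == w) = false := by simp [h]
      rw [h2, h3, Bool.false_or, Bool.false_or]

theorem pvFoldlIte {α β : Type} (c : α → Bool) (f g : α → β) :
    ∀ (l : List α) (acc : List β),
      l.foldl (fun r w => if c w then r ++ [f w] else r ++ [g w]) acc
        = acc ++ l.map (fun w => if c w then f w else g w)
  | [], acc => by simp
  | w :: rest, acc => by
    simp only [List.foldl_cons, List.map_cons, pvFoldlIte c f g rest]
    by_cases h : c w <;> simp [h]

theorem pvFilterMap_ne_nil (l : List (Int × String)) (w : String) :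
    (l.filterMap (fun p => if p.2 = w then some (PySem.Int.toStr (p.1 + 1)) else none) ≠ [])
      ↔ l.any (fun p => p.2 == w) = true := by
  simp only [ne_eq, List.filterMap_eq_nil_iff, List.any_eq_true]
  constructor
  · intro h
    rw [not_forall] at h
    obtain ⟨p, hp⟩ := h
    rw [Classical.not_imp] at hp
    obtain ⟨hp, hne⟩ := hp
    refine ⟨p, hp, ?_⟩
    by_cases hw : p.2 = w
    · simp [hw]
    · simp [hw] at hne
  · rintro ⟨p, hp, hw⟩ h
    have := h p hp
    simp at hw
    simp [hw] at this

-- ===== VERDICT (by name: the statement is the Claim_ definition above) =====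
theorem find_word_occurrences_spec : Claim_equal_find_word_occurrences := by
  intro group_A group_B _
  show _ = _
  unfold find_word_occurrences find_word_occurrences_alt
  simp only
  rw [pvFoldlIte (fun word => (pvBuildA group_A).contains word)
      (fun word => PySem.Str.join " " ((pvBuildA group_A).getD word []))
      (fun _ => "-1") group_B []]
  rw [List.nil_append]
  apply List.map_congr_left
  intro w _
  unfold pvFmt pvBuildA
  rw [pvBuild_contains, pvBuild_getD]
  simp only [PySem.Dict.contains_empty, PySem.Dict.getD_empty, Bool.false_or, List.nil_append]
  by_cases h : (PySem.List.enumerate group_A).any (fun p => p.2 == w) = true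
  · rw [if_pos h, if_pos ((pvFilterMap_ne_nil _ _).mpr h)]
  · rw [if_neg h, if_neg (by simpa [pvFilterMap_ne_nil] using h)]
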